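-- pv_equiv track=rewrite | github.com/gereleth/aoc_python | src/year2024/day19.py | part1
-- ===== SOURCE A (Python) =====
-- from collections import Counter, defaultdict
-- from typing import Iterator
--
-- class PentacolorTree:
--     def __init__(self):
--         self.is_leaf = False
--         self.children = defaultdict(PentacolorTree)
--
--     def put(self, value: str) -> None:
--         """Add a towel to the tree"""
--         if len(value) == 0:
--             self.is_leaf = True
--         else:
--             child = self.children[value[0]]
--             child.put(value[1:])
--
--     def get_splits(self, value: str) -> Iterator[tuple[str, str]]:
--         """Splits string into `towel+rest` for all towels that fit"""
--         tree = self
--         for i, char in enumerate(value):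
--             if char not in tree.children:
--                 break
--             tree = tree.children[char]
--             if tree.is_leaf:
--                 yield value[: i + 1], value[i + 1 :]
--
-- def parse_input(text_input: str):
--     towels, designs = text_input.split("\n\n")
--     towels = towels.split(", ")
--     # index towels into a tree structure
--     towels_tree = PentacolorTree()
--     for towel in towels:
--         towels_tree.put(towel)
--     designs = designs.split()
--     return towels_tree, designs
--
-- def part1(text_input: str) -> int:
--     towels_tree, designs = parse_input(text_input)
--     total = 0
--     # canmake is a dict like {design: can we make it}
--     canmake = defaultdict(bool)
--     canmake[""] = True
--     for design in designs:
--         # iterate though design backwards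
--         for i in range(1, len(design) + 1):
--             tail = design[-i:]
--             if tail in canmake:
--                 continue
--             # see if `tail` is `some_towel + rest` where we can make `rest`
--             for _, rest in towels_tree.get_splits(tail):
--                 if canmake[rest]:
--                     canmake[tail] = True
--                     break
--         total += canmake[design]
--     return total
-- ===== SOURCE B (Python) =====
-- def part1(text_input: str) -> int:
--     towels_part, designs_part = text_input.split("\n\n")
--     towels = set(towels_part.split(", "))
--     maxlen = max(len(t) for t in towels)
--     total = 0
--     for design in designs_part.split():
--         n = len(design)
--         dp = [False] * (n + 1)
--         dp[0] = True
--         for i in range(n):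
--             if dp[i]:
--                 for L in range(1, min(maxlen, n - i) + 1):
--                     if design[i:i + L] in towels:
--                         dp[i + L] = True
--         total += 1 if dp[n] else 0
--     return total
-- ===== Notes on version B (the rewrite author's own statement) =====
-- stated objective: simpler
-- what changed: B drops the trie class and the suffix-memo dict shared across designs: it parses the towels into a set, takes the maximum towel length, and runs a plain forward word-break DP (boolean array over prefix lengths) per design, counting designs whose full-length entry is reachable.
import Mathlib
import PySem

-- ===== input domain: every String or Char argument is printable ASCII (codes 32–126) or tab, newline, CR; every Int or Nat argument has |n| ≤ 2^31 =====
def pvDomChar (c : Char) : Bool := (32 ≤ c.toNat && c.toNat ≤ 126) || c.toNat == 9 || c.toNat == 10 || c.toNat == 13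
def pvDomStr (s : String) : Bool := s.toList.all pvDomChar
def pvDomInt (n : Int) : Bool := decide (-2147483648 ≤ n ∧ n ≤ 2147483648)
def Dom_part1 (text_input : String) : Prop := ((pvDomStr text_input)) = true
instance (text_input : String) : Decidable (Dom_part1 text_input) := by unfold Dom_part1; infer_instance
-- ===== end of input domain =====

-- B replaces A's trie + cross-design suffix memo dict by a per-design forward word-break DP over a towel set (simpler).
-- A raises ValueError when the input does not split into exactly two blocks at "\n\n"; those inputs are outside Pre_part1.

-- ===== PORT A =====
-- the PentacolorTree class: children is an insertion-ordered dict Char → tree (mutual inductive, no nesting)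
mutual
inductive PTree : Type where
  | mk : Bool → PChildren → PTree
  deriving Repr
inductive PChildren : Type where
  | nil : PChildren
  | cons : Char → PTree → PChildren → PChildren
  deriving Repr
end

def PTree.isLeaf : PTree → Bool
  | .mk b _ => b

def PTree.children : PTree → PChildren
  | .mk _ ch => ch

-- dict lookup `char in tree.children` / `tree.children[char]`
def PChildren.find? : PChildren → Char → Option PTree
  | .nil, _ => none
  | .cons c t rest, c' => if c = c' then some t else rest.find? c'

-- PentacolorTree.put: `self.children[value[0]]` (defaultdict: a missing child is created, appended last)
mutual
def PTree.put : PTree → List Char → PTree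
  | .mk _ ch, [] => .mk true ch
  | .mk lf ch, c :: rest => .mk lf (PChildren.putChild ch c rest)
  termination_by t v => (v.length, sizeOf t)
  decreasing_by all_goals (simp_wf; omega)
def PChildren.putChild : PChildren → Char → List Char → PChildren
  | .nil, c, rest => .cons c (PTree.put (.mk false .nil) rest) .nil
  | .cons c' t ch, c, rest =>
      if c' = c then .cons c' (PTree.put t rest) ch
      else .cons c' t (PChildren.putChild ch c rest)
  termination_by ch _ rest => (rest.length + 1, sizeOf ch)
  decreasing_by all_goals (simp_wf; omega)
end

-- get_splits: walk `value` char by char, break on a missing child, yield (value[:i+1], value[i+1:]) at leaves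
def getSplitsGo (tree : PTree) (value : List Char) : List Char → Nat → List (List Char × List Char)
  | [], _ => []
  | ch :: rest, i =>
    match tree.children.find? ch with
    | none => []
    | some tr =>
        (if tr.isLeaf then
           [(PySem.List.slice value none (some ((i : Int) + 1)),
             PySem.List.slice value (some ((i : Int) + 1)) none)]
         else []) ++ getSplitsGo tr value rest (i + 1)

def PTree.getSplits (t : PTree) (value : List Char) : List (List Char × List Char) :=
  getSplitsGo t value value 0

-- parse_input; `towels, designs = text_input.split("\n\n")` raises ValueError unless exactly 2 pieces (none here)
def parseInput (text_input : String) : Option (PTree × List (List Char)) :=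
  match PySem.Chars.splitOn text_input.toList ['\n', '\n'] with
  | [towelsPart, designsPart] =>
      let towels := PySem.Chars.splitOn towelsPart [',', ' ']
      let tree := towels.foldl (fun t w => t.put w) (.mk false .nil)
      some (tree, PySem.Chars.split₀ designsPart)
  | _ => none

-- defaultdict(bool) subscript: a missing key is inserted with False and False is returned
def ddGet (d : PySem.Dict (List Char) Bool) (k : List Char) :
    PySem.Dict (List Char) Bool × Bool :=
  match d.get? k with
  | some v => (d, v)
  | none => (d.insert k false, false)

-- `for _, rest in towels_tree.get_splits(tail): if canmake[rest]: canmake[tail] = True; break`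
def innerLoop (tail : List Char) : PySem.Dict (List Char) Bool → List (List Char × List Char) →
    PySem.Dict (List Char) Bool
  | d, [] => d
  | d, (_, rest) :: more =>
      let p := ddGet d rest
      if p.2 then p.1.insert tail true else innerLoop tail p.1 more

-- `for i in range(1, len(design) + 1): tail = design[-i:]; …`
def designStep (tree : PTree) (d : PySem.Dict (List Char) Bool) (design : List Char) :
    PySem.Dict (List Char) Bool :=
  (PySem.List.pyRange 1 ((design.length : Int) + 1) 1).foldl
    (fun d i =>
      let tail := PySem.List.slice design (some (-i)) none
      if d.contains tail then d
      else innerLoop tail d (tree.getSplits tail)) d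

def part1 (text_input : String) : Int :=
  match parseInput text_input with
  | none => 0
  | some (tree, designs) =>
      (designs.foldl
        (fun (st : Int × PySem.Dict (List Char) Bool) design =>
          let d := designStep tree st.2 design
          let p := ddGet d design
          (st.1 + (if p.2 then 1 else 0), p.1))
        (0, PySem.Dict.empty.insert [] true)).1

-- ===== PORT B =====
-- forward word-break DP: dp[j] ⇔ the first j characters of the design can be tiled with towels
def part1_alt (text_input : String) : Int :=
  match PySem.Chars.splitOn text_input.toList ['\n', '\n'] with
  | [towelsPart, designsPart] =>
      let towels := PySem.Set.ofList (PySem.Chars.splitOn towelsPart [',', ' '])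
      -- max(len(t) for t in towels): towels is nonempty (splitOn returns ≥ 1 piece), fold of max
      let maxlen := towels.foldl (fun m t => max m t.length) 0
      (PySem.Chars.split₀ designsPart).foldl
        (fun (total : Int) design =>
          let n := design.length
          let dp0 := (List.replicate (n + 1) false).set 0 true
          let dpF := (List.range n).foldl
            (fun dp (i : Nat) =>
              if dp.getD i false then
                -- for L in range(1, min(maxlen, n - i) + 1): L = j + 1
                (List.range (min maxlen (n - i))).foldl
                  (fun dp (j : Nat) =>
                    if towels.contains
                        (PySem.List.slice design (some (i : Int))
                          (some ((i : Int) + ((j : Int) + 1)))) then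
                      dp.set (i + (j + 1)) true
                    else dp) dp
              else dp) dp0
          total + (if dpF.getD n false then 1 else 0)) 0
  | _ => 0

-- ===== PRECONDITION & SPEC =====
-- Pre_: exactly the inputs on which text_input.split("\n\n") yields two pieces (otherwise A raises ValueError)
def Pre_part1 (text_input : String) : Prop :=
  (PySem.Chars.splitOn text_input.toList ['\n', '\n']).length = 2
instance (text_input : String) : Decidable (Pre_part1 text_input) := by
  unfold Pre_part1; infer_instance

def pvWitness_part1 : String := "r, g, rg\n\nrgr bw"

def Spec_part1 (text_input : String) (out : Int) : Prop := out = part1_alt text_input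
instance (text_input : String) (out : Int) : Decidable (Spec_part1 text_input out) := by
  unfold Spec_part1; infer_instance

-- ===== CLAIM (what is proved, stated in full; the proofs are below) =====
def Claim_equal_part1 : Prop :=
  ∀ (text_input : String), Dom_part1 text_input → Pre_part1 text_input →
    Spec_part1 text_input (part1 text_input)

-- ===== LEMMAS AND PROOFS =====

-- ---- the common specification: word-break decomposability over the towel list ts ----
def decompGo (ts : List (List Char)) : Nat → List Char → Bool
  | _, [] => true
  | 0, _ :: _ => false
  | fuel + 1, c :: cs =>
      (List.range (c :: cs).length).any fun j =>
        ts.contains ((c :: cs).take (j + 1)) && decompGo ts fuel ((c :: cs).drop (j + 1))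

def decompB (ts : List (List Char)) (s : List Char) : Bool := decompGo ts s.length s

def specSum (ts : List (List Char)) (designs : List (List Char)) : Int :=
  (designs.map (fun s => if decompB ts s = true then (1 : Int) else 0)).sum

lemma decompGo_fuel (ts : List (List Char)) :
    ∀ (f1 f2 : Nat) (s : List Char), s.length ≤ f1 → s.length ≤ f2 →
      decompGo ts f1 s = decompGo ts f2 s := by
  intro f1
  induction f1 with
  | zero =>
    intro f2 s h1 h2
    cases s with
    | nil => cases f2 <;> rfl
    | cons c cs => simp at h1
  | succ g ih =>
    intro f2 s h1 h2
    cases s with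
    | nil => cases f2 <;> rfl
    | cons c cs =>
      cases f2 with
      | zero => simp at h2
      | succ h =>
        simp only [decompGo]
        congr 1
        funext j
        congr 1
        apply ih
        · simp only [List.length_drop, List.length_cons] at *; omega
        · simp only [List.length_drop, List.length_cons] at *; omega

lemma decompB_nil (ts : List (List Char)) : decompB ts [] = true := rfl

lemma decompB_iff (ts : List (List Char)) (s : List Char) (hs : s ≠ []) :
    decompB ts s = true ↔
      ∃ j : Nat, j < s.length ∧ ts.contains (s.take (j + 1)) = true ∧
        decompB ts (s.drop (j + 1)) = true := by
  cases s with
  | nil => exact absurd rfl hs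
  | cons c cs =>
    unfold decompB
    have hlen : (c :: cs).length = cs.length + 1 := rfl
    rw [hlen]
    simp only [decompGo, List.any_eq_true, List.mem_range]
    constructor
    · rintro ⟨j, hj, hb⟩
      rw [Bool.and_eq_true] at hb
      refine ⟨j, by simpa [hlen] using hj, hb.1, ?_⟩
      rw [← hb.2]
      apply decompGo_fuel
      · simp only [List.length_drop, List.length_cons]; omega
      · simp only [List.length_drop, List.length_cons]; omega
    · rintro ⟨j, hj, hc, hd⟩
      refine ⟨j, by simpa [hlen] using hj, ?_⟩
      rw [Bool.and_eq_true]
      refine ⟨hc, ?_⟩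
      rw [← hd]
      apply decompGo_fuel
      · simp only [List.length_drop, List.length_cons]; omega
      · simp only [List.length_drop, List.length_cons]; omega

lemma decompB_prepend (ts : List (List Char)) (t q : List Char)
    (ht : t ∈ ts) (htne : t ≠ []) (hq : decompB ts q = true) :
    decompB ts (t ++ q) = true := by
  have hl : 0 < t.length := List.length_pos_iff.mpr htne
  rw [decompB_iff ts (t ++ q) (by simp [htne])]
  refine ⟨t.length - 1, ?_, ?_, ?_⟩
  · simp only [List.length_append]; omega
  · have : t.length - 1 + 1 = t.length := by omega
    rw [this, List.take_left]
    exact List.contains_iff_mem.mpr ht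
  · have : t.length - 1 + 1 = t.length := by omega
    rw [this, List.drop_left]
    exact hq

lemma decompB_append_aux (ts : List (List Char)) :
    ∀ (n : Nat) (q t : List Char), q.length ≤ n → decompB ts q = true → t ∈ ts → t ≠ [] →
      decompB ts (q ++ t) = true := by
  intro n
  induction n with
  | zero =>
    intro q t hn hq ht htne
    have : q = [] := List.eq_nil_of_length_eq_zero (by omega)
    subst this
    simpa using decompB_prepend ts t [] ht htne (decompB_nil ts)
  | succ m ih =>
    intro q t hn hq ht htne
    by_cases hqn : q = []
    · subst hqn
      simpa using decompB_prepend ts t [] ht htne (decompB_nil ts)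
    · obtain ⟨j, hj, hcont, hrest⟩ := (decompB_iff ts q hqn).mp hq
      have hsplit : q = q.take (j + 1) ++ q.drop (j + 1) := (List.take_append_drop _ _).symm
      have hlen : (q.drop (j + 1)).length ≤ m := by
        simp only [List.length_drop]; omega
      have h1 : decompB ts (q.drop (j + 1) ++ t) = true := ih _ t hlen hrest ht htne
      have h2 : decompB ts (q.take (j + 1) ++ (q.drop (j + 1) ++ t)) = true := by
        apply decompB_prepend ts _ _ (List.contains_iff_mem.mp hcont) _ h1
        have : (q.take (j + 1)).length = j + 1 := by
          simp only [List.length_take]; omega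
        intro hnil
        rw [hnil] at this
        simp at this
      calc decompB ts (q ++ t) = decompB ts (q.take (j + 1) ++ (q.drop (j + 1) ++ t)) := by
            rw [← List.append_assoc, ← hsplit]
        _ = true := h2

lemma decompB_append (ts : List (List Char)) (q t : List Char)
    (hq : decompB ts q = true) (ht : t ∈ ts) (htne : t ≠ []) :
    decompB ts (q ++ t) = true :=
  decompB_append_aux ts q.length q t le_rfl hq ht htne

lemma decompB_strip_last_aux (ts : List (List Char)) :
    ∀ (n : Nat) (s : List Char), s.length ≤ n → decompB ts s = true → s ≠ [] →
      ∃ q t, t ∈ ts ∧ t ≠ [] ∧ s = q ++ t ∧ decompB ts q = true := by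
  intro n
  induction n with
  | zero =>
    intro s hn _ hs
    exact absurd (List.eq_nil_of_length_eq_zero (by omega)) hs
  | succ m ih =>
    intro s hn hs hsne
    obtain ⟨j, hj, hcont, hrest⟩ := (decompB_iff ts s hsne).mp hs
    have hp : s.take (j + 1) ∈ ts := List.contains_iff_mem.mp hcont
    have hpne : s.take (j + 1) ≠ [] := by
      intro hnil
      have : (s.take (j + 1)).length = j + 1 := by simp only [List.length_take]; omega
      rw [hnil] at this; simp at this
    by_cases hr : s.drop (j + 1) = []
    · refine ⟨[], s.take (j + 1), hp, hpne, ?_, decompB_nil ts⟩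
      rw [List.nil_append]
      conv_lhs => rw [← List.take_append_drop (j + 1) s]
      rw [hr, List.append_nil]
    · obtain ⟨q', t, ht, htne, heq, hq'⟩ := ih (s.drop (j + 1))
        (by simp only [List.length_drop]; omega) hrest hr
      refine ⟨s.take (j + 1) ++ q', t, ht, htne, ?_, ?_⟩
      · conv_lhs => rw [← List.take_append_drop (j + 1) s]
        rw [heq, List.append_assoc]
      · exact decompB_prepend ts _ _ hp hpne hq'

lemma decompB_strip_last (ts : List (List Char)) (s : List Char)
    (hs : decompB ts s = true) (hsne : s ≠ []) :
    ∃ q t, t ∈ ts ∧ t ≠ [] ∧ s = q ++ t ∧ decompB ts q = true :=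
  decompB_strip_last_aux ts s.length s le_rfl hs hsne

-- ---- slice helpers (Python slices used by the two ports, on in-range indices) ----
lemma slice_to_succ (xs : List Char) (i : Nat) :
    PySem.List.slice xs none (some ((i : Int) + 1)) = xs.take (i + 1) := by
  have h : ((i : Int) + 1) = (((i + 1 : Nat)) : Int) := by push_cast; ring
  rw [h, PySem.List.slice_to_natCast]

lemma slice_from_succ (xs : List Char) (i : Nat) :
    PySem.List.slice xs (some ((i : Int) + 1)) none = xs.drop (i + 1) := by
  have h : ((i : Int) + 1) = (((i + 1 : Nat)) : Int) := by push_cast; ring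
  rw [h, PySem.List.slice_from_natCast]

lemma slice_neg_drop (xs : List Char) (m : Nat) :
    PySem.List.slice xs (some (-((m : Int) + 1))) none = xs.drop (xs.length - (m + 1)) := by
  have h : (-((m : Int) + 1)) = -(((m + 1 : Nat)) : Int) := by push_cast; ring
  rw [h, PySem.List.slice_from_neg_natCast xs (m + 1) (by omega)]

lemma slice_nat_add (xs : List Char) (i j : Nat) :
    PySem.List.slice xs (some (i : Int)) (some ((i : Int) + ((j : Int) + 1))) =
      (xs.drop i).take (j + 1) := by
  have h : ((i : Int) + ((j : Int) + 1)) = (((i + (j + 1) : Nat)) : Int) := by push_cast; ring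
  rw [h, PySem.List.slice_natCast]
  congr 1
  omega

-- ---- the trie: membership along a path ----
def walkT : PTree → List Char → Option PTree
  | t, [] => some t
  | t, c :: cs =>
    match t.children.find? c with
    | none => none
    | some tr => walkT tr cs

def memT (t : PTree) (v : List Char) : Bool := ((walkT t v).map PTree.isLeaf).getD false

lemma memT_nil (t : PTree) : memT t [] = t.isLeaf := rfl

lemma memT_cons (t : PTree) (c : Char) (cs : List Char) :
    memT t (c :: cs) = match t.children.find? c with
      | none => false
      | some tr => memT tr cs := by
  cases h : t.children.find? c <;> simp [memT, walkT, h]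

lemma memT_empty : ∀ (v : List Char), memT (PTree.mk false .nil) v = false := by
  intro v
  cases v with
  | nil => rfl
  | cons c cs => rw [memT_cons]; rfl

lemma find?_putChild (c : Char) (rest : List Char) :
    ∀ (ch : PChildren) (c' : Char),
      (PChildren.putChild ch c rest).find? c' =
        if c = c' then some (PTree.put ((ch.find? c).getD (PTree.mk false .nil)) rest)
        else ch.find? c'
  | .nil, c' => by
    simp only [PChildren.putChild, PChildren.find?]
    by_cases h : c = c' <;> simp [h]
  | .cons c0 t0 ch0, c' => by
    simp only [PChildren.putChild]
    by_cases h0 : c0 = c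
    · subst h0
      simp only [PChildren.find?]
      by_cases h1 : c0 = c' <;> simp [PChildren.find?, h1]
    · rw [if_neg h0]
      simp only [PChildren.find?]
      by_cases h1 : c0 = c'
      · subst h1
        rw [if_pos rfl, if_neg (fun he => h0 he.symm), if_pos rfl]
      · rw [if_neg h1, if_neg h1, find?_putChild c rest ch0 c']
        by_cases h2 : c = c'
        · subst h2; rw [if_pos rfl, if_pos rfl, if_neg (fun he => h0 he)]
        · rw [if_neg h2, if_neg h2]
  termination_by ch _ => sizeOf ch

lemma memT_put : ∀ (w : List Char) (t : PTree) (v : List Char),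
    memT (t.put w) v = (decide (v = w) || memT t v) := by
  intro w
  induction w with
  | nil =>
    intro t v
    obtain ⟨lf, ch⟩ := t
    cases v with
    | nil => simp [PTree.put, memT_nil, PTree.isLeaf]
    | cons c cs =>
      rw [show (PTree.mk lf ch).put [] = PTree.mk true ch from by simp [PTree.put]]
      rw [memT_cons, memT_cons]
      simp [PTree.children]
  | cons c rest ih =>
    intro t v
    obtain ⟨lf, ch⟩ := t
    rw [show (PTree.mk lf ch).put (c :: rest) = PTree.mk lf (PChildren.putChild ch c rest) from by simp [PTree.put]]
    cases v with
    | nil =>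
      rw [memT_nil, memT_nil]
      simp [PTree.isLeaf]
    | cons c' cs =>
      rw [memT_cons, memT_cons]
      simp only [PTree.children]
      rw [find?_putChild]
      by_cases hc : c = c'
      · subst hc
        rw [if_pos rfl]
        simp only []
        rw [ih]
        cases hf : ch.find? c with
        | none =>
          simp only [Option.getD_none]
          rw [memT_empty]
          simp
        | some tr =>
          simp only [Option.getD_some]
          simp
      · rw [if_neg hc]
        have : decide (c' :: cs = c :: rest) = false := by
          simp; intro h; exact absurd h.symm hc
        rw [this]
        simp

lemma memT_foldl : ∀ (l : List (List Char)) (t : PTree) (v : List Char),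
    memT (l.foldl (fun a w => a.put w) t) v = (decide (v ∈ l) || memT t v) := by
  intro l
  induction l with
  | nil => intro t v; simp
  | cons w l ih =>
    intro t v
    rw [List.foldl_cons, ih, memT_put]
    by_cases h : v = w
    · subst h; simp
    · simp [h]

-- ---- get_splits characterization ----
lemma getSplitsGo_mem (p r : List Char) :
    ∀ (cs : List Char) (t : PTree) (i : Nat) (full : List Char),
      ((p, r) ∈ getSplitsGo t full cs i) ↔
        ∃ j : Nat, 0 < j ∧ j ≤ cs.length ∧ p = full.take (i + j) ∧ r = full.drop (i + j) ∧
          memT t (cs.take j) = true := by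
  intro cs
  induction cs with
  | nil =>
    intro t i full
    constructor
    · intro h
      simp [getSplitsGo] at h
    · rintro ⟨j, hj0, hjle, -, -, -⟩
      simp only [List.length_nil] at hjle
      omega
  | cons ch rest ih =>
    intro t i full
    simp only [getSplitsGo]
    cases hf : t.children.find? ch with
    | none =>
      simp only [List.not_mem_nil, false_iff, not_exists]
      rintro j ⟨hj0, hjle, hp, hr, hm⟩
      have htake : (ch :: rest).take j = ch :: rest.take (j - 1) := by
        cases j with
        | zero => omega
        | succ j' => simp [List.take]
      rw [htake, memT_cons, hf] at hm
      simp at hm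
    | some tr =>
      rw [List.mem_append]
      have hhead : ((p, r) ∈ if tr.isLeaf = true then
          [(PySem.List.slice full none (some ((i : Int) + 1)),
            PySem.List.slice full (some ((i : Int) + 1)) none)] else []) ↔
          (tr.isLeaf = true ∧ p = full.take (i + 1) ∧ r = full.drop (i + 1)) := by
        by_cases hl : tr.isLeaf = true
        · rw [if_pos hl]
          rw [slice_to_succ, slice_from_succ]
          simp [hl, Prod.ext_iff]
        · rw [if_neg hl]
          simp [hl]
      rw [hhead, ih tr (i + 1) full]
      constructor
      · rintro (⟨hl, hp, hr⟩ | ⟨j', hj0', hjle', hp, hr, hm⟩)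
        · refine ⟨1, by omega, by simp, hp, hr, ?_⟩
          rw [show (ch :: rest).take 1 = [ch] from rfl, memT_cons, hf]
          exact hl
        · refine ⟨j' + 1, by omega, by simp only [List.length_cons]; omega, ?_, ?_, ?_⟩
          · rw [hp]; congr 1; omega
          · rw [hr]; congr 1; omega
          · rw [show (ch :: rest).take (j' + 1) = ch :: rest.take j' from by simp [List.take],
               memT_cons, hf]
            exact hm
      · rintro ⟨j, hj0, hjle, hp, hr, hm⟩
        cases j with
        | zero => omega
        | succ j' =>
          rw [show (ch :: rest).take (j' + 1) = ch :: rest.take j' from by simp [List.take],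
             memT_cons, hf] at hm
          cases j' with
          | zero =>
            left
            refine ⟨by simpa using hm, by simpa using hp, by simpa using hr⟩
          | succ j'' =>
            right
            refine ⟨j'' + 1, by omega, by simp only [List.length_cons] at hjle; omega, ?_, ?_, hm⟩
            · rw [hp]; congr 1; omega
            · rw [hr]; congr 1; omega

lemma getSplits_mem (t : PTree) (value p r : List Char) :
    ((p, r) ∈ t.getSplits value) ↔
      ∃ j : Nat, 0 < j ∧ j ≤ value.length ∧ p = value.take j ∧ r = value.drop j ∧
        memT t (value.take j) = true := by
  unfold PTree.getSplits
  rw [getSplitsGo_mem]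
  constructor
  · rintro ⟨j, h1, h2, h3, h4, h5⟩
    exact ⟨j, h1, h2, by simpa using h3, by simpa using h4, h5⟩
  · rintro ⟨j, h1, h2, h3, h4, h5⟩
    exact ⟨j, h1, h2, by simpa using h3, by simpa using h4, h5⟩

-- ---- the memo dict invariant ----
def InvD (ts : List (List Char)) (d : PySem.Dict (List Char) Bool) : Prop :=
  (∀ k v, d.get? k = some v → v = decompB ts k) ∧ d.get? [] = some true

lemma InvD_init (ts : List (List Char)) :
    InvD ts (PySem.Dict.empty.insert [] true) := by
  constructor
  · intro k v h
    rw [PySem.Dict.get?_insert] at h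
    by_cases hk : k = []
    · subst hk
      rw [if_pos rfl] at h
      cases h
      exact (decompB_nil ts).symm
    · rw [if_neg hk] at h
      rw [PySem.Dict.get?_empty] at h
      cases h
  · rw [PySem.Dict.get?_insert, if_pos rfl]

lemma ddGet_spec (ts : List (List Char)) (d : PySem.Dict (List Char) Bool) (k : List Char)
    (h : InvD ts d) (hk : decompB ts k = true → (d.get? k).isSome = true) :
    InvD ts (ddGet d k).1 ∧ (ddGet d k).2 = decompB ts k ∧
      (∀ k', d.get? k' = some true → (ddGet d k).1.get? k' = some true) := by
  unfold ddGet
  cases hd : d.get? k with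
  | some v =>
    simp only []
    exact ⟨h, h.1 k v hd, fun k' h' => h'⟩
  | none =>
    simp only []
    have hdk : decompB ts k = false := by
      cases hdec : decompB ts k
      · rfl
      · have := hk hdec
        rw [hd] at this
        simp at this
    have hkne : k ≠ [] := by
      intro he
      rw [he, decompB_nil] at hdk
      cases hdk
    refine ⟨⟨?_, ?_⟩, ?_, ?_⟩
    · intro k' v h'
      rw [PySem.Dict.get?_insert] at h'
      by_cases hk' : k' = k
      · subst hk'
        rw [if_pos rfl] at h'
        cases h'
        exact hdk.symm
      · rw [if_neg hk'] at h'
        exact h.1 k' v h'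
    · rw [PySem.Dict.get?_insert, if_neg (fun he => hkne he.symm)]
      exact h.2
    · exact hdk.symm
    · intro k' h'
      rw [PySem.Dict.get?_insert]
      by_cases hk' : k' = k
      · subst hk'
        rw [hd] at h'
        cases h'
      · rw [if_neg hk']
        exact h'

-- ---- the inner break-loop over splits ----
lemma innerLoop_spec (ts : List (List Char)) (tail : List Char) (htail : tail ≠ []) :
    ∀ (S : List (List Char × List Char)) (d : PySem.Dict (List Char) Bool),
      InvD ts d →
      (∀ pr ∈ S, pr.1 ∈ ts ∧ pr.1 ≠ [] ∧ pr.1 ++ pr.2 = tail) →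
      (∀ pr ∈ S, decompB ts pr.2 = true → d.get? pr.2 = some true) →
      (∀ j : Nat, j < tail.length → ts.contains (tail.take (j + 1)) = true →
          decompB ts (tail.drop (j + 1)) = true →
          (tail.take (j + 1), tail.drop (j + 1)) ∈ S) →
      InvD ts (innerLoop tail d S) ∧
      (∀ k, d.get? k = some true → (innerLoop tail d S).get? k = some true) ∧
      (decompB ts tail = true → (innerLoop tail d S).get? tail = some true) := by
  intro S
  induction S with
  | nil =>
    intro d hinv _ _ hcomp
    refine ⟨hinv, fun k h => h, ?_⟩
    intro hdec
    obtain ⟨j, hj, hc, hr⟩ := (decompB_iff ts tail htail).mp hdec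
    exact absurd (hcomp j hj hc hr) (List.not_mem_nil)
  | cons pr more ih =>
    obtain ⟨pfx, rest⟩ := pr
    intro d hinv hS hrest hcomp
    obtain ⟨hmem, hne, happ⟩ := hS (pfx, rest) (List.mem_cons_self)
    have hget := ddGet_spec ts d rest hinv (by
      intro hdec
      rw [hrest (pfx, rest) (List.mem_cons_self) hdec]
      rfl)
    simp only [innerLoop]
    cases hv : (ddGet d rest).2 with
    | true =>
      rw [if_pos rfl]
      have hdr : decompB ts rest = true := by rw [← hget.2.1, hv]
      have hdt : decompB ts tail = true := by
        rw [← happ]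
        exact decompB_prepend ts pfx rest hmem hne hdr
      refine ⟨⟨?_, ?_⟩, ?_, ?_⟩
      · intro k v h'
        rw [PySem.Dict.get?_insert] at h'
        by_cases hk : k = tail
        · subst hk; rw [if_pos rfl] at h'; cases h'; exact hdt.symm
        · rw [if_neg hk] at h'; exact hget.1.1 k v h'
      · rw [PySem.Dict.get?_insert, if_neg (fun he => htail he.symm)]
        exact hget.1.2
      · intro k h'
        rw [PySem.Dict.get?_insert]
        by_cases hk : k = tail
        · subst hk; rw [if_pos rfl]
        · rw [if_neg hk]; exact hget.2.2 k h'
      · intro _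
        rw [PySem.Dict.get?_insert, if_pos rfl]
    | false =>
      rw [if_neg (by simp)]
      have hdr : decompB ts rest = false := by rw [← hget.2.1, hv]
      have hmore := ih (ddGet d rest).1 hget.1
        (fun pr h => hS pr (List.mem_cons_of_mem _ h))
        (fun pr h hdec => hget.2.2 pr.2 (hrest pr (List.mem_cons_of_mem _ h) hdec))
        (by
          intro j hj hc hr
          have := hcomp j hj hc hr
          rcases List.mem_cons.mp this with heq | hmem'
          · exfalso
            have : tail.drop (j + 1) = rest := congrArg Prod.snd heq
            rw [this] at hr
            rw [hdr] at hr
            cases hr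
          · exact hmem')
      exact ⟨hmore.1, fun k h' => hmore.2.1 k (hget.2.2 k h'), hmore.2.2⟩

-- ---- A's per-design loop ----
def aFold (tree : PTree) (design : List Char) (d0 : PySem.Dict (List Char) Bool) (m : Nat) :
    PySem.Dict (List Char) Bool :=
  (PySem.List.pyRange 1 ((m : Int) + 1) 1).foldl
    (fun d i =>
      let tail := PySem.List.slice design (some (-i)) none
      if d.contains tail then d
      else innerLoop tail d (tree.getSplits tail)) d0

lemma designStep_eq (tree : PTree) (d : PySem.Dict (List Char) Bool) (design : List Char) :
    designStep tree d design = aFold tree design d design.length := rfl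

lemma pyRange_singleton (a : Int) : PySem.List.pyRange a (a + 1) 1 = [a] := by
  rw [PySem.List.pyRange_one]
  norm_num

lemma aFold_zero (tree : PTree) (design : List Char) (d0 : PySem.Dict (List Char) Bool) :
    aFold tree design d0 0 = d0 := by
  unfold aFold
  norm_num [PySem.List.pyRange_one]

lemma aFold_succ (tree : PTree) (design : List Char) (d0 : PySem.Dict (List Char) Bool) (m : Nat) :
    aFold tree design d0 (m + 1) =
      (fun d (i : Int) =>
        let tail := PySem.List.slice design (some (-i)) none
        if d.contains tail then d
        else innerLoop tail d (tree.getSplits tail)) (aFold tree design d0 m) ((m : Int) + 1) := by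
  unfold aFold
  rw [show (((m + 1 : Nat)) : Int) + 1 = ((m : Int) + 1) + 1 by push_cast; ring]
  rw [PySem.List.pyRange_one_append 1 ((m : Int) + 1) (((m : Int) + 1) + 1) (by omega) (by omega)]
  rw [List.foldl_append, pyRange_singleton, List.foldl_cons, List.foldl_nil]

lemma aFold_spec (ts : List (List Char)) (tree : PTree)
    (hmem : ∀ v, memT tree v = true ↔ v ∈ ts)
    (design : List Char) (d0 : PySem.Dict (List Char) Bool) (h0 : InvD ts d0) :
    ∀ m, m ≤ design.length →
      InvD ts (aFold tree design d0 m) ∧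
      (∀ j, j ≤ m → decompB ts (design.drop (design.length - j)) = true →
        (aFold tree design d0 m).get? (design.drop (design.length - j)) = some true) := by
  intro m
  induction m with
  | zero =>
    intro _
    rw [aFold_zero]
    refine ⟨h0, ?_⟩
    intro j hj _
    have hj0 : j = 0 := by omega
    subst hj0
    rw [Nat.sub_zero, List.drop_length]
    exact h0.2
  | succ m ih =>
    intro hm
    have ihm := ih (by omega)
    rw [aFold_succ]
    simp only []
    rw [slice_neg_drop]
    set dm := aFold tree design d0 m with hdm
    set t := design.drop (design.length - (m + 1)) with ht
    have htlen : t.length = m + 1 := by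
      rw [ht, List.length_drop]; omega
    have htne : t ≠ [] := List.ne_nil_of_length_pos (by omega)
    by_cases hcont : dm.contains t = true
    · rw [if_pos hcont]
      refine ⟨ihm.1, ?_⟩
      intro j hj hdec
      by_cases hjm : j ≤ m
      · exact ihm.2 j hjm hdec
      · have hj1 : j = m + 1 := by omega
        subst hj1
        rw [PySem.Dict.contains_eq_isSome_get?] at hcont
        obtain ⟨v, hv⟩ := Option.isSome_iff_exists.mp hcont
        have := ihm.1.1 t v hv
        rw [← ht] at hdec ⊢
        rw [hv, this, hdec]
    · rw [if_neg (by simpa using hcont)]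
      have hS : ∀ pr ∈ tree.getSplits t, pr.1 ∈ ts ∧ pr.1 ≠ [] ∧ pr.1 ++ pr.2 = t := by
        rintro ⟨p, r⟩ hpr
        obtain ⟨j, hj0, hjle, hp, hr, hmm⟩ := (getSplits_mem tree t p r).mp hpr
        refine ⟨?_, ?_, ?_⟩
        · rw [hp]; exact (hmem _).mp (hp ▸ hmm)
        · rw [hp]
          apply List.ne_nil_of_length_pos
          rw [List.length_take]
          omega
        · rw [hp, hr]; exact List.take_append_drop j t
      have hrest : ∀ pr ∈ tree.getSplits t, decompB ts pr.2 = true →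
          dm.get? pr.2 = some true := by
        rintro ⟨p, r⟩ hpr hdec
        obtain ⟨j, hj0, hjle, hp, hr, hmm⟩ := (getSplits_mem tree t p r).mp hpr
        simp only at hdec ⊢
        have hr' : r = design.drop (design.length - (m + 1 - j)) := by
          rw [hr, ht, List.drop_drop]
          congr 1
          omega
        rw [hr'] at hdec ⊢
        exact ihm.2 (m + 1 - j) (by omega) hdec
      have hcomp : ∀ j : Nat, j < t.length → ts.contains (t.take (j + 1)) = true →
          decompB ts (t.drop (j + 1)) = true →
          (t.take (j + 1), t.drop (j + 1)) ∈ tree.getSplits t := by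
        intro j hj hc _
        rw [getSplits_mem]
        exact ⟨j + 1, by omega, by omega, rfl, rfl,
          (hmem _).mpr (List.contains_iff_mem.mp hc)⟩
      have hil := innerLoop_spec ts t htne (tree.getSplits t) dm ihm.1 hS hrest hcomp
      refine ⟨hil.1, ?_⟩
      intro j hj hdec
      by_cases hjm : j ≤ m
      · exact hil.2.1 _ (ihm.2 j hjm hdec)
      · have hj1 : j = m + 1 := by omega
        subst hj1
        rw [← ht] at hdec ⊢
        exact hil.2.2 hdec

lemma designStep_spec (ts : List (List Char)) (tree : PTree)
    (hmem : ∀ v, memT tree v = true ↔ v ∈ ts)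
    (d : PySem.Dict (List Char) Bool) (design : List Char) (hinv : InvD ts d) :
    InvD ts (designStep tree d design) ∧
      (decompB ts design = true → (designStep tree d design).get? design = some true) := by
  rw [designStep_eq]
  have h := aFold_spec ts tree hmem design d hinv design.length le_rfl
  refine ⟨h.1, ?_⟩
  intro hdec
  have := h.2 design.length le_rfl
  rw [Nat.sub_self, List.drop_zero] at this
  exact this hdec

-- ---- A's loop over the designs ----
def aBody (tree : PTree) (designs : List (List Char)) : Int :=
  (designs.foldl
    (fun (st : Int × PySem.Dict (List Char) Bool) design =>
      let d := designStep tree st.2 design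
      let p := ddGet d design
      (st.1 + (if p.2 then 1 else 0), p.1))
    (0, PySem.Dict.empty.insert [] true)).1

lemma outerA (ts : List (List Char)) (tree : PTree)
    (hmem : ∀ v, memT tree v = true ↔ v ∈ ts) :
    ∀ (designs : List (List Char)) (st : Int × PySem.Dict (List Char) Bool), InvD ts st.2 →
      (designs.foldl
        (fun (st : Int × PySem.Dict (List Char) Bool) design =>
          let d := designStep tree st.2 design
          let p := ddGet d design
          (st.1 + (if p.2 then 1 else 0), p.1)) st).1
      = st.1 + specSum ts designs := by
  intro designs
  induction designs with
  | nil =>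
    intro st _
    simp [specSum]
  | cons design rest ih =>
    intro st hinv
    rw [List.foldl_cons]
    have hds := designStep_spec ts tree hmem st.2 design hinv
    have hdd := ddGet_spec ts (designStep tree st.2 design) design hds.1 (by
      intro hdec
      rw [hds.2 hdec]
      rfl)
    simp only []
    rw [ih _ hdd.1]
    simp only [hdd.2.1]
    show st.1 + (if decompB ts design = true then (1 : Int) else 0) + specSum ts rest
        = st.1 + specSum ts (design :: rest)
    unfold specSum
    rw [List.map_cons, List.sum_cons]
    ring

lemma part1_eq_body (text : String) (tp dp : List Char)
    (hsplit : PySem.Chars.splitOn text.toList ['\n', '\n'] = [tp, dp]) :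
    part1 text = aBody
      ((PySem.Chars.splitOn tp [',', ' ']).foldl (fun t w => t.put w) (PTree.mk false .nil))
      (PySem.Chars.split₀ dp) := by
  have hp : parseInput text = some
      (((PySem.Chars.splitOn tp [',', ' ']).foldl (fun t w => t.put w) (PTree.mk false .nil)),
        PySem.Chars.split₀ dp) := by
    unfold parseInput
    rw [hsplit]
  unfold part1 aBody
  rw [hp]

lemma A_main (text : String) (tp dp : List Char)
    (hsplit : PySem.Chars.splitOn text.toList ['\n', '\n'] = [tp, dp]) :
    part1 text = specSum (PySem.Chars.splitOn tp [',', ' ']) (PySem.Chars.split₀ dp) := by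
  rw [part1_eq_body text tp dp hsplit]
  have hmem : ∀ v, memT ((PySem.Chars.splitOn tp [',', ' ']).foldl
      (fun t w => t.put w) (PTree.mk false .nil)) v = true ↔
      v ∈ PySem.Chars.splitOn tp [',', ' '] := by
    intro v
    rw [memT_foldl, memT_empty]
    simp
  unfold aBody
  rw [outerA _ _ hmem _ _ (InvD_init _)]
  ring

-- ---- generic lemmas about B's "set true at computed indices" folds ----
lemma set_getD_mono (dp : List Bool) (i q : Nat) (h : dp.getD q false = true) :
    (dp.set i true).getD q false = true := by
  rw [List.getD_eq_getElem?_getD] at h ⊢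
  by_cases hiq : i = q
  · subst hiq
    have hlt : i < dp.length := by
      by_contra hge
      rw [List.getElem?_eq_none (by omega)] at h
      simp at h
    rw [List.getElem?_set_self hlt]
    rfl
  · rw [List.getElem?_set_ne hiq]
    exact h

lemma set_getD_source (dp : List Bool) (i q : Nat)
    (h : (dp.set i true).getD q false = true) :
    dp.getD q false = true ∨ i = q := by
  by_cases hiq : i = q
  · right; exact hiq
  · left
    rw [List.getD_eq_getElem?_getD] at h ⊢
    rw [List.getElem?_set_ne hiq] at h
    exact h

lemma foldlSet_length (C : Nat → Bool) (f : Nat → Nat) :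
    ∀ (l : List Nat) (dp : List Bool),
      (l.foldl (fun dp j => if C j then dp.set (f j) true else dp) dp).length = dp.length := by
  intro l
  induction l with
  | nil => intro dp; rfl
  | cons j l ih =>
    intro dp
    rw [List.foldl_cons, ih]
    by_cases h : C j = true
    · rw [if_pos h, List.length_set]
    · rw [if_neg h]

lemma foldlSet_mono (C : Nat → Bool) (f : Nat → Nat) :
    ∀ (l : List Nat) (dp : List Bool) (q : Nat), dp.getD q false = true →
      (l.foldl (fun dp j => if C j then dp.set (f j) true else dp) dp).getD q false = true := by
  intro l
  induction l with
  | nil => intro dp q h; exact h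
  | cons j l ih =>
    intro dp q h
    rw [List.foldl_cons]
    apply ih
    by_cases hc : C j = true
    · rw [if_pos hc]; exact set_getD_mono dp (f j) q h
    · rw [if_neg hc]; exact h

lemma foldlSet_low (C : Nat → Bool) (f : Nat → Nat) :
    ∀ (l : List Nat) (dp : List Bool) (q : Nat), (∀ j ∈ l, f j ≠ q) →
      (l.foldl (fun dp j => if C j then dp.set (f j) true else dp) dp).getD q false
        = dp.getD q false := by
  intro l
  induction l with
  | nil => intro dp q _; rfl
  | cons j l ih =>
    intro dp q hne
    rw [List.foldl_cons, ih _ _ (fun j' hj' => hne j' (List.mem_cons_of_mem _ hj'))]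
    by_cases hc : C j = true
    · rw [if_pos hc, List.getD_eq_getElem?_getD, List.getD_eq_getElem?_getD,
        List.getElem?_set_ne (hne j (List.mem_cons_self))]
    · rw [if_neg hc]

lemma foldlSet_hit (C : Nat → Bool) (f : Nat → Nat) :
    ∀ (l : List Nat) (dp : List Bool) (j0 : Nat), j0 ∈ l → C j0 = true → f j0 < dp.length →
      (l.foldl (fun dp j => if C j then dp.set (f j) true else dp) dp).getD (f j0) false
        = true := by
  intro l
  induction l with
  | nil => intro dp j0 h; cases h
  | cons j l ih =>
    intro dp j0 hmem hc hlt
    rw [List.foldl_cons]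
    rcases List.mem_cons.mp hmem with heq | hmem'
    · subst heq
      rw [if_pos hc]
      apply foldlSet_mono
      rw [List.getD_eq_getElem?_getD, List.getElem?_set_self hlt]
      rfl
    · apply ih _ _ hmem' hc
      by_cases h : C j = true
      · rw [if_pos h, List.length_set]; exact hlt
      · rw [if_neg h]; exact hlt

lemma foldlSet_sound (C : Nat → Bool) (f : Nat → Nat) :
    ∀ (l : List Nat) (dp : List Bool) (q : Nat),
      (l.foldl (fun dp j => if C j then dp.set (f j) true else dp) dp).getD q false = true →
      dp.getD q false = true ∨ ∃ j ∈ l, C j = true ∧ f j = q := by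
  intro l
  induction l with
  | nil => intro dp q h; exact Or.inl h
  | cons j l ih =>
    intro dp q h
    rw [List.foldl_cons] at h
    rcases ih _ _ h with h' | ⟨j', hj', hc', hf'⟩
    · by_cases hc : C j = true
      · rw [if_pos hc] at h'
        rcases set_getD_source dp (f j) q h' with h'' | h''
        · exact Or.inl h''
        · exact Or.inr ⟨j, List.mem_cons_self, hc, h''⟩
      · rw [if_neg hc] at h'
        exact Or.inl h'
    · exact Or.inr ⟨j', List.mem_cons_of_mem _ hj', hc', hf'⟩

-- ---- B's per-design DP ----
def bStep (tw : PySem.Set (List Char)) (maxlen : Nat) (design : List Char) :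
    List Bool → Nat → List Bool :=
  fun dp (i : Nat) =>
    if dp.getD i false then
      (List.range (min maxlen (design.length - i))).foldl
        (fun dp (j : Nat) =>
          if tw.contains (PySem.List.slice design (some (i : Int))
              (some ((i : Int) + ((j : Int) + 1)))) then
            dp.set (i + (j + 1)) true
          else dp) dp
    else dp

def bDp (tw : PySem.Set (List Char)) (maxlen : Nat) (design : List Char) (k : Nat) : List Bool :=
  (List.range k).foldl (bStep tw maxlen design)
    ((List.replicate (design.length + 1) false).set 0 true)

lemma bDp_succ (tw : PySem.Set (List Char)) (maxlen : Nat) (design : List Char) (k : Nat) :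
    bDp tw maxlen design (k + 1) = bStep tw maxlen design (bDp tw maxlen design k) k := by
  unfold bDp
  rw [List.range_succ, List.foldl_append, List.foldl_cons, List.foldl_nil]

lemma bStep_eq (tw : PySem.Set (List Char)) (maxlen : Nat) (design : List Char)
    (dp : List Bool) (i : Nat) :
    bStep tw maxlen design dp i =
      if dp.getD i false then
        (List.range (min maxlen (design.length - i))).foldl
          (fun dp j =>
            if tw.contains ((design.drop i).take (j + 1)) then dp.set (i + (j + 1)) true
            else dp) dp
      else dp := by
  unfold bStep
  simp only [slice_nat_add]

lemma bDp_inv (ts : List (List Char)) (tw : PySem.Set (List Char)) (maxlen : Nat)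
    (design : List Char)
    (hc : ∀ x : List Char, tw.contains x = ts.contains x)
    (hml : ∀ t ∈ ts, t.length ≤ maxlen) :
    ∀ k, k ≤ design.length →
      (bDp tw maxlen design k).length = design.length + 1 ∧
      (bDp tw maxlen design k).getD 0 false = true ∧
      (∀ q, (bDp tw maxlen design k).getD q false = true →
        decompB ts (design.take q) = true) ∧
      (∀ i L, i < k → 1 ≤ L → L ≤ min maxlen (design.length - i) →
        (bDp tw maxlen design k).getD i false = true →
        ts.contains ((design.drop i).take L) = true →
        (bDp tw maxlen design k).getD (i + L) false = true) := by
  intro k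
  induction k with
  | zero =>
    intro _
    have h0 : bDp tw maxlen design 0 = (List.replicate (design.length + 1) false).set 0 true :=
      rfl
    rw [h0]
    refine ⟨by rw [List.length_set, List.length_replicate], ?_, ?_, ?_⟩
    · rw [List.getD_eq_getElem?_getD, List.getElem?_set_self (by simp)]
      rfl
    · intro q hq
      by_cases hq0 : q = 0
      · subst hq0
        rw [List.take_zero]
        exact decompB_nil ts
      · exfalso
        rw [List.getD_eq_getElem?_getD, List.getElem?_set_ne (fun h => hq0 h.symm)] at hq
        by_cases hlt : q < design.length + 1
        · rw [List.getElem?_replicate, if_pos (by simpa using hlt)] at hq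
          simp at hq
        · rw [List.getElem?_eq_none (by rw [List.length_replicate]; omega)] at hq
          simp at hq
    · intro i L hi
      exact absurd hi (by omega)
  | succ k ih =>
    intro hk
    have ihk := ih (by omega)
    obtain ⟨hlen, h0, hsound, hE⟩ := ihk
    rw [bDp_succ, bStep_eq]
    by_cases hdpk : (bDp tw maxlen design k).getD k false = true
    · rw [if_pos hdpk]
      simp only [hc]
      set dpk := bDp tw maxlen design k with hdpkdef
      have hflow : ∀ q, q ≤ k →
          ((List.range (min maxlen (design.length - k))).foldl
            (fun dp j => if ts.contains ((design.drop k).take (j + 1)) then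
              dp.set (k + (j + 1)) true else dp) dpk).getD q false
          = dpk.getD q false := by
        intro q hq
        apply foldlSet_low
        intro j _
        show k + (j + 1) ≠ q
        omega
      refine ⟨?_, ?_, ?_, ?_⟩
      · rw [foldlSet_length]
        exact hlen
      · rw [hflow 0 (by omega)]; exact h0
      · intro q hq
        rcases foldlSet_sound _ _ _ _ _ hq with hq' | ⟨j, hjmem, hcj, hfj⟩
        · exact hsound q hq'
        · have hjlt : j < min maxlen (design.length - k) := List.mem_range.mp hjmem
          have hq2 : q = k + (j + 1) := hfj.symm
          subst hq2
          rw [List.take_add]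
          apply decompB_append ts _ _ (hsound k hdpk)
          · exact List.contains_iff_mem.mp hcj
          · apply List.ne_nil_of_length_pos
            rw [List.length_take, List.length_drop]
            omega
      · intro i L hi hL1 hL2 hdi hcont
        have hLm : L ≤ maxlen := le_trans hL2 (Nat.min_le_left _ _)
        have hLn : L ≤ design.length - i := le_trans hL2 (Nat.min_le_right _ _)
        by_cases hik : i < k
        · have hdi2 : dpk.getD i false = true := by
            rw [← hflow i (by omega)]
            exact hdi
          apply foldlSet_mono
          exact hE i L hik hL1 hL2 hdi2 hcont
        · have hik2 : i = k := by omega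
          subst hik2
          have hgoal : i + L = i + (L - 1 + 1) := by omega
          rw [hgoal]
          apply foldlSet_hit
          · exact List.mem_range.mpr (by omega)
          · show ts.contains ((design.drop i).take (L - 1 + 1)) = true
            have hL3 : L - 1 + 1 = L := by omega
            rw [hL3]
            exact hcont
          · show i + (L - 1 + 1) < dpk.length
            rw [hlen]
            omega
    · rw [if_neg (by simpa using hdpk)]
      refine ⟨hlen, h0, hsound, ?_⟩
      intro i L hi hL1 hL2 hdi hcont
      by_cases hik : i < k
      · exact hE i L hik hL1 hL2 hdi hcont
      · have hik2 : i = k := by omega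
        subst hik2
        rw [hdi] at hdpk
        exact absurd rfl hdpk

lemma bDp_complete (ts : List (List Char)) (tw : PySem.Set (List Char)) (maxlen : Nat)
    (design : List Char)
    (hc : ∀ x : List Char, tw.contains x = ts.contains x)
    (hml : ∀ t ∈ ts, t.length ≤ maxlen) :
    ∀ q, q ≤ design.length → decompB ts (design.take q) = true →
      (bDp tw maxlen design design.length).getD q false = true := by
  obtain ⟨hlen, h0, hsound, hE⟩ := bDp_inv ts tw maxlen design hc hml design.length le_rfl
  intro q
  induction q using Nat.strong_induction_on with
  | _ q ihq =>
    intro hq hdec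
    by_cases hq0 : q = 0
    · subst hq0; exact h0
    · have hsne : design.take q ≠ [] := by
        apply List.ne_nil_of_length_pos
        rw [List.length_take]
        omega
      obtain ⟨q', t, ht, htne, heq, hq'⟩ := decompB_strip_last ts (design.take q) hdec hsne
      have hlq : q'.length + t.length = q := by
        have hh := congrArg List.length heq
        rw [List.length_take, List.length_append] at hh
        have hmin : min q design.length = q := by omega
        rw [hmin] at hh
        omega
      have htl : 1 ≤ t.length := by
        cases t with
        | nil => exact absurd rfl htne
        | cons a b => simp
      have hq2 : q' = design.take q'.length := by
        have h1 : (design.take q).take q'.length = q' := by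
          rw [heq, List.take_left]
        conv_lhs => rw [← h1]
        rw [List.take_take]
        congr 1
        omega
      have hdpq : (bDp tw maxlen design design.length).getD q'.length false = true := by
        apply ihq q'.length (by omega) (by omega)
        rw [← hq2]
        exact hq'
      have htL : (design.drop q'.length).take t.length = t := by
        rw [List.take_drop]
        have hqq : q'.length + t.length = q := by omega
        rw [hqq, heq, List.drop_left]
      have hres := hE q'.length t.length (by omega) htl
        (by
          have := hml t ht
          omega)
        hdpq (by rw [htL]; exact List.contains_iff_mem.mpr ht)
      have hqq2 : q'.length + t.length = q := by omega
      rw [hqq2] at hres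
      exact hres

lemma bDp_flag (ts : List (List Char)) (tw : PySem.Set (List Char)) (maxlen : Nat)
    (design : List Char)
    (hc : ∀ x : List Char, tw.contains x = ts.contains x)
    (hml : ∀ t ∈ ts, t.length ≤ maxlen) :
    (bDp tw maxlen design design.length).getD design.length false = decompB ts design := by
  obtain ⟨hlen, h0, hsound, hE⟩ := bDp_inv ts tw maxlen design hc hml design.length le_rfl
  cases hdec : decompB ts design with
  | true =>
    apply bDp_complete ts tw maxlen design hc hml design.length le_rfl
    rw [List.take_length]
    exact hdec
  | false =>
    cases hdp : (bDp tw maxlen design design.length).getD design.length false with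
    | false => rfl
    | true =>
      exfalso
      have hs := hsound design.length hdp
      rw [List.take_length, hdec] at hs
      cases hs

-- ---- B's towel-set facts ----
lemma contains_ofList (l : List (List Char)) (x : List Char) :
    (PySem.Set.ofList l).contains x = l.contains x := by
  show List.contains (PySem.Set.ofList l) x = l.contains x
  by_cases hx : x ∈ l
  · rw [List.contains_iff_mem.mpr hx,
      List.contains_iff_mem.mpr ((PySem.Set.mem_ofList l x).mpr hx)]
  · have h1 : List.contains (PySem.Set.ofList l) x ≠ true := by
      intro h
      exact hx ((PySem.Set.mem_ofList l x).mp (List.contains_iff_mem.mp h))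
    have h2 : l.contains x ≠ true := fun h => hx (List.contains_iff_mem.mp h)
    simp only [ne_eq, Bool.not_eq_true] at h1 h2
    rw [h1, h2]

lemma init_le_foldl_max : ∀ (l : List (List Char)) (a : Nat),
    a ≤ l.foldl (fun m t => max m t.length) a := by
  intro l
  induction l with
  | nil => intro a; exact le_rfl
  | cons w l ih =>
    intro a
    rw [List.foldl_cons]
    exact le_trans (le_max_left a w.length) (ih (max a w.length))

lemma mem_le_foldl_max : ∀ (l : List (List Char)) (a : Nat) (x : List Char), x ∈ l →
    x.length ≤ l.foldl (fun m t => max m t.length) a := by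
  intro l
  induction l with
  | nil => intro a x h; cases h
  | cons w l ih =>
    intro a x hx
    rw [List.foldl_cons]
    rcases List.mem_cons.mp hx with heq | hmem
    · subst heq
      exact le_trans (le_max_right a x.length) (init_le_foldl_max l (max a x.length))
    · exact ih _ x hmem

-- ---- B's loop over the designs ----
lemma outerB (ts : List (List Char)) (tw : PySem.Set (List Char)) (maxlen : Nat)
    (hc : ∀ x : List Char, tw.contains x = ts.contains x)
    (hml : ∀ t ∈ ts, t.length ≤ maxlen) :
    ∀ (designs : List (List Char)) (total : Int),
      (designs.foldl
        (fun (total : Int) design =>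
          total + (if (bDp tw maxlen design design.length).getD design.length false
            then 1 else 0)) total)
      = total + specSum ts designs := by
  intro designs
  induction designs with
  | nil => intro total; simp [specSum]
  | cons design rest ih =>
    intro total
    rw [List.foldl_cons, ih]
    rw [bDp_flag ts tw maxlen design hc hml]
    unfold specSum
    rw [List.map_cons, List.sum_cons]
    ring

lemma B_main (text : String) (tp dp : List Char)
    (hsplit : PySem.Chars.splitOn text.toList ['\n', '\n'] = [tp, dp]) :
    part1_alt text = specSum (PySem.Chars.splitOn tp [',', ' ']) (PySem.Chars.split₀ dp) := by
  unfold part1_alt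
  rw [hsplit]
  set ts := PySem.Chars.splitOn tp [',', ' '] with hts
  set tw := PySem.Set.ofList ts with htw
  set maxlen := tw.foldl (fun m t => max m t.length) 0 with hmaxlen
  show ((PySem.Chars.split₀ dp).foldl
      (fun (total : Int) design =>
        total + (if (bDp tw maxlen design design.length).getD design.length false
          then 1 else 0)) 0)
    = specSum ts (PySem.Chars.split₀ dp)
  rw [outerB ts tw maxlen (fun x => contains_ofList ts x) (fun t ht =>
    mem_le_foldl_max tw 0 t ((PySem.Set.mem_ofList ts t).mpr ht))]
  ring

-- ===== VERDICT (by name: the statement is the Claim_ definition above) =====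
theorem part1_spec : Claim_equal_part1 := by
  intro text_input _ hpre
  unfold Spec_part1
  obtain ⟨tp, dp, hsplit⟩ := List.length_eq_two.mp hpre
  rw [A_main text_input tp dp hsplit, B_main text_input tp dp hsplit]
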